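-- pv_equiv track=rewrite | github.com/Charley-Forey-AI/vista-unapproved-invoices-mcp | server/services/invoice_analysis.py | _bucket_from_findings
-- ===== SOURCE A (Python) =====
-- from typing import Any
--
-- def _bucket_from_findings(findings: list[dict[str, Any]]) -> str:
--     if not findings:
--         return "approve_candidate"
--     severities = {finding["severity"] for finding in findings}
--     if "high" in severities:
--         return "needs_investigation"
--     if "medium" in severities:
--         return "needs_correction"
--     return "approve_candidate"
-- ===== SOURCE B (Python) =====
-- _RANK = {"high": 2, "medium": 1}
-- _LABELS = ("approve_candidate", "needs_correction", "needs_investigation")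
--
-- def _bucket_from_findings(findings):
--     if not findings:
--         return "approve_candidate"
--     top = max(_RANK.get(f["severity"], 0) for f in findings)
--     return _LABELS[top]
-- ===== Notes on version B (the rewrite author's own statement) =====
-- stated objective: idiomatic
-- what changed: Replaces the severity set plus two ordered membership tests with a single running-maximum of a numeric severity rank, mapped through a label table.
import Mathlib
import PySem

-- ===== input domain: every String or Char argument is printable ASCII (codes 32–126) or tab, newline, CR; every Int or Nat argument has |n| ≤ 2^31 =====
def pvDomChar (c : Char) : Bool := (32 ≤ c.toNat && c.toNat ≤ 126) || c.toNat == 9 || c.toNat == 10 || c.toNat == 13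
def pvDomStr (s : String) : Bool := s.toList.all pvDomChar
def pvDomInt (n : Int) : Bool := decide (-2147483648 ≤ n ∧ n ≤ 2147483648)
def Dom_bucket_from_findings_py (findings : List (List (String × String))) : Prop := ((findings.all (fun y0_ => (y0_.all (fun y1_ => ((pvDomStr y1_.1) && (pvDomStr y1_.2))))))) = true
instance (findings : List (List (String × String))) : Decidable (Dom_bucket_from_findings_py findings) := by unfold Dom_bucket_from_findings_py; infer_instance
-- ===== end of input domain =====

-- B replaces A's severity set and two ordered membership tests by one running maximum of a
-- numeric severity rank mapped through a label table (idiomatic; same O(n) cost).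

-- ===== PORT A =====
-- finding["severity"]: first-match dict lookup; total form via getD "" — Pre_ excludes the
-- inputs (missing "severity" key) where Python raises KeyError.
def pvSev (f : List (String × String)) : String :=
  ((PySem.Dict.mk f).get? "severity").getD ""

def bucket_from_findings_py (findings : List (List (String × String))) : String :=
  if findings.isEmpty then "approve_candidate"
  else
    let severities : PySem.Set String := PySem.Set.ofList (findings.map pvSev)
    if PySem.Set.contains severities "high" then "needs_investigation"
    else if PySem.Set.contains severities "medium" then "needs_correction"
    else "approve_candidate"

-- ===== PORT B =====
-- _RANK.get(f["severity"], 0)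
def pvRank (s : String) : Int :=
  if s = "high" then 2 else if s = "medium" then 1 else 0

-- max(generator) over the nonempty findings, then the label table indexed by top
def bucket_from_findings_py_alt (findings : List (List (String × String))) : String :=
  if findings.isEmpty then "approve_candidate"
  else
    let top : Int :=
      (PySem.List.max? (findings.map (fun f => pvRank (pvSev f))) (fun x => x)).getD 0
    if top = 2 then "needs_investigation"
    else if top = 1 then "needs_correction"
    else "approve_candidate"

-- ===== PRECONDITION & SPEC =====
-- Pre_ excludes exactly the findings lacking a "severity" key, where Python A (and B) raise KeyError.
def Pre_bucket_from_findings_py (findings : List (List (String × String))) : Prop :=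
  ∀ f ∈ findings, (f.any (fun p => p.1 == "severity")) = true
instance (findings : List (List (String × String))) : Decidable (Pre_bucket_from_findings_py findings) := by unfold Pre_bucket_from_findings_py; infer_instance

def pvWitness_bucket_from_findings_py : (List (List (String × String))) :=
  [[("severity", "medium")], [("severity", "low")]]

def Spec_bucket_from_findings_py (findings : List (List (String × String))) (out : String) : Prop := out = bucket_from_findings_py_alt findings
instance (findings : List (List (String × String))) (out : String) : Decidable (Spec_bucket_from_findings_py findings out) := by unfold Spec_bucket_from_findings_py; infer_instance

-- ===== CLAIM (what is proved, stated in full; the proofs are below) =====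
def Claim_equal_bucket_from_findings_py : Prop := ∀ (findings : List (List (String × String))), Dom_bucket_from_findings_py findings → Pre_bucket_from_findings_py findings → Spec_bucket_from_findings_py findings (bucket_from_findings_py findings)

-- ===== LEMMAS AND PROOFS =====

lemma pvRank_le_two (s : String) : pvRank s ≤ 2 := by
  unfold pvRank; split_ifs <;> omega

-- The running maximum of the ranks picks exactly A's first-hit severity bucket.
lemma bucket_core (sevs : List String) (hne : sevs ≠ []) :
    (if "high" ∈ sevs then "needs_investigation"
     else if "medium" ∈ sevs then "needs_correction"
     else "approve_candidate")
    = (let top := (PySem.List.max? (sevs.map pvRank) (fun x => x)).getD 0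
       if top = 2 then "needs_investigation"
       else if top = 1 then "needs_correction"
       else ("approve_candidate" : String)) := by
  have hrne : sevs.map pvRank ≠ [] := by simpa using hne
  obtain ⟨m, hm⟩ : ∃ m, PySem.List.max? (sevs.map pvRank) (fun x => x) = some m := by
    cases h : PySem.List.max? (sevs.map pvRank) (fun x => x) with
    | none => exact absurd ((PySem.List.max?_eq_none_iff _ _).mp h) hrne
    | some m => exact ⟨m, rfl⟩
  have hmem : m ∈ sevs.map pvRank := PySem.List.max?_mem hm
  have hmax : ∀ y ∈ sevs.map pvRank, y ≤ m := fun y hy => PySem.List.max?_isMax hm y hy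
  obtain ⟨s0, hs0, hs0m⟩ := List.mem_map.mp hmem
  simp only [hm, Option.getD_some]
  by_cases hh : "high" ∈ sevs
  · have h2 : (2 : Int) ≤ m := hmax _ (List.mem_map.mpr ⟨"high", hh, by simp [pvRank]⟩)
    have hle : m ≤ 2 := hs0m ▸ pvRank_le_two s0
    have hm2 : m = 2 := le_antisymm hle h2
    simp [hh, hm2]
  · have hm2 : m ≠ 2 := by
      rw [← hs0m]
      unfold pvRank
      split_ifs with h1 h2
      · exact fun _ => hh (h1 ▸ hs0)
      · omega
      · omega
    by_cases hmed : "medium" ∈ sevs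
    · have h1 : (1 : Int) ≤ m := hmax _ (List.mem_map.mpr ⟨"medium", hmed, by simp [pvRank]⟩)
      have hle : m ≤ 2 := hs0m ▸ pvRank_le_two s0
      have hm1 : m = 1 := by omega
      simp [hh, hmed, hm1]
    · have hm0 : m = 0 := by
        rw [← hs0m]
        unfold pvRank
        split_ifs with h1 h2
        · exact absurd (h1 ▸ hs0) hh
        · exact absurd (h2 ▸ hs0) hmed
        · rfl
      simp [hh, hmed, hm0]

-- ===== VERDICT (by name: the statement is the Claim_ definition above) =====
theorem bucket_from_findings_py_spec : Claim_equal_bucket_from_findings_py := by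
  intro findings _ _
  unfold Spec_bucket_from_findings_py bucket_from_findings_py bucket_from_findings_py_alt
  by_cases h : findings.isEmpty
  · simp [h]
  · have hne : findings.map pvSev ≠ [] := by
      simpa [List.isEmpty_iff] using h
    simp only [h]
    have := bucket_core (findings.map pvSev) hne
    simp only [List.map_map] at this
    simpa [PySem.Set.contains, PySem.Set.mem_ofList, Function.comp] using this
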